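-- pv_equiv track=rewrite | github.com/sudipto0315/AI_Lab | Assignment_2/q6.py | transpose_and_flatten
-- ===== SOURCE A (Python) =====
-- def transpose_and_flatten(matrix):
--     # Calculate the transpose
--     transpose_result = []
--     for col in range(len(matrix[0])):
--         transposed_row = []
--         for row in range(len(matrix)):
--             transposed_row.append(matrix[row][col])
--         transpose_result.append(transposed_row)
--
--     # Flatten the matrix
--     flatten_result = []
--     for row in matrix:
--         for element in row:
--             flatten_result.append(element)
--
--     return transpose_result, flatten_result
-- ===== SOURCE B (Python) =====
-- def transpose_and_flatten(matrix):
--     # Single fused pass over the rows: build the transpose row-major and the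
--     # flattening at the same time.
--     ncols = len(matrix[0])
--     transpose = [[] for _ in range(ncols)]
--     flatten = []
--     for row in matrix:
--         for element in row:
--             flatten.append(element)
--         for c in range(ncols):
--             transpose[c].append(row[c])
--     return transpose, flatten
-- ===== Notes on version B (the rewrite author's own statement) =====
-- stated objective: alternative
-- what changed: One fused pass over the rows builds the transpose row-major (appending row[c] to column c) and the flattening simultaneously, instead of A's two separate passes (a column-major nested loop for the transpose, then a second nested loop to flatten).
import Mathlib
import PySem

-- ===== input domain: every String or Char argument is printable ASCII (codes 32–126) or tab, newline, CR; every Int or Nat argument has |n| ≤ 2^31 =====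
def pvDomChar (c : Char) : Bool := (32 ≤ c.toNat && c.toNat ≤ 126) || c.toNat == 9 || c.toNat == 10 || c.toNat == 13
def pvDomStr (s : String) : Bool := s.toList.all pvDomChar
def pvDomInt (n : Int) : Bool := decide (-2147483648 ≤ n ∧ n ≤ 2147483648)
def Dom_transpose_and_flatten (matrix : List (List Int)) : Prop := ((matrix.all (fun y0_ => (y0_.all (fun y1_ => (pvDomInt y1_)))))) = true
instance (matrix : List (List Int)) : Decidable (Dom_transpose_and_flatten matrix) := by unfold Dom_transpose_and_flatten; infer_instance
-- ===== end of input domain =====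

-- B builds the transpose row-major and the flattening in one fused pass over the rows,
-- instead of A's two separate passes (column-major nested loop, then flatten loop).

-- ===== PORT A =====
def transpose_and_flatten (matrix : List (List Int)) : List (List Int) × List Int :=
  -- transpose: for col in range(len(matrix[0])): for row in range(len(matrix)): append matrix[row][col]
  let transpose_result :=
    (PySem.List.pyRange 0 ((PySem.List.pyGetD matrix 0 []).length : Int) 1).foldl
      (fun acc col =>
        acc ++ [(PySem.List.pyRange 0 (matrix.length : Int) 1).foldl
          (fun tr row => tr ++ [PySem.List.pyGetD (PySem.List.pyGetD matrix row []) col 0]) []])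
      []
  -- flatten: for row in matrix: for element in row: append element
  let flatten_result := matrix.foldl (fun acc row => row.foldl (fun a e => a ++ [e]) acc) []
  (transpose_result, flatten_result)

-- ===== PORT B =====
def transpose_and_flatten_alt (matrix : List (List Int)) : List (List Int) × List Int :=
  let ncols := (PySem.List.pyGetD matrix 0 []).length
  -- transpose = [[] for _ in range(ncols)]; flatten = []
  -- for row in matrix: extend flatten with row; append row[c] to transpose[c] for each c < ncols
  matrix.foldl
    (fun st row =>
      (st.1.mapIdx (fun c col => col ++ [PySem.List.pyGetD row (c : Int) 0]),
       row.foldl (fun a e => a ++ [e]) st.2))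
    (List.replicate ncols [], [])

-- ===== PRECONDITION & SPEC =====
-- Pre_ excludes exactly the inputs where Python A raises IndexError: the empty matrix
-- (matrix[0]) and ragged matrices with a row shorter than the first row (matrix[row][col]).
-- Python B raises on exactly the same inputs.
def Pre_transpose_and_flatten (matrix : List (List Int)) : Prop :=
  matrix ≠ [] ∧ ∀ row ∈ matrix, (matrix.headD []).length ≤ row.length
instance (matrix : List (List Int)) : Decidable (Pre_transpose_and_flatten matrix) := by
  unfold Pre_transpose_and_flatten; infer_instance
def pvWitness_transpose_and_flatten : List (List Int) := [[1, 2], [3, 4]]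

def Spec_transpose_and_flatten (matrix : List (List Int)) (out : List (List Int) × List Int) : Prop := out = transpose_and_flatten_alt matrix
instance (matrix : List (List Int)) (out : List (List Int) × List Int) : Decidable (Spec_transpose_and_flatten matrix out) := by unfold Spec_transpose_and_flatten; infer_instance

-- ===== CLAIM (what is proved, stated in full; the proofs are below) =====
def Claim_equal_transpose_and_flatten : Prop := ∀ (matrix : List (List Int)), Dom_transpose_and_flatten matrix → Pre_transpose_and_flatten matrix → Spec_transpose_and_flatten matrix (transpose_and_flatten matrix)

-- ===== LEMMAS AND PROOFS =====

-- B's fused per-row update, applied down the matrix, appends each row's col-c entry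
-- to accumulator column c.
-- a fold with two independent accumulators is two folds
theorem fold_pair_split {α β γ : Type} (l : List γ) (F : α → γ → α) (G : β → γ → β) (a : α) (b : β) :
    l.foldl (fun st e => (F st.1 e, G st.2 e)) (a, b) = (l.foldl F a, l.foldl G b) := by
  induction l generalizing a b with
  | nil => rfl
  | cons x xs ih => simp [List.foldl_cons, ih]

theorem alt_fold_mapIdx (matrix : List (List Int)) (tr : List (List Int)) :
    matrix.foldl (fun tr row => tr.mapIdx (fun c col => col ++ [PySem.List.pyGetD row (c : Int) 0])) tr
      = tr.mapIdx (fun c col => col ++ matrix.map (fun row => PySem.List.pyGetD row (c : Int) 0)) := by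
  induction matrix generalizing tr with
  | nil =>
      apply List.ext_getElem (by simp)
      intro i h1 h2
      simp [List.getElem_mapIdx]
  | cons r rest ih =>
      simp only [List.foldl_cons, ih]
      apply List.ext_getElem (by simp)
      intro i h1 h2
      simp [List.getElem_mapIdx]

-- mapIdx over a replicate of [] is a map over the index range.
theorem mapIdx_replicate_nil (n : ℕ) (L : ℕ → List Int) :
    (List.replicate n ([] : List Int)).mapIdx (fun c col => col ++ L c)
      = (List.range n).map L := by
  apply List.ext_getElem (by simp)
  intro i h1 h2
  simp [List.getElem_mapIdx]

theorem transpose_and_flatten_eq (matrix : List (List Int)) :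
    transpose_and_flatten matrix = transpose_and_flatten_alt matrix := by
  unfold transpose_and_flatten transpose_and_flatten_alt
  dsimp only
  refine Eq.trans ?_ (fold_pair_split matrix
        (fun tr row => tr.mapIdx (fun c col => col ++ [PySem.List.pyGetD row (c : Int) 0]))
        (fun fl (row : List Int) => row.foldl (fun a e => a ++ [e]) fl)
        (List.replicate (PySem.List.pyGetD matrix 0 []).length []) []).symm
  refine Prod.ext ?_ rfl
  show _ = matrix.foldl _ _
  rw [alt_fold_mapIdx, mapIdx_replicate_nil]
  rw [PySem.List.foldl_append_singleton_eq_map]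
  have hinner : ∀ col : Int,
      (PySem.List.pyRange 0 (matrix.length : Int) 1).foldl
        (fun tr row => tr ++ [PySem.List.pyGetD (PySem.List.pyGetD matrix row []) col 0]) []
      = matrix.map (fun row => PySem.List.pyGetD row col 0) := by
    intro col
    rw [PySem.List.foldl_pyRange_zero_pyGetD' matrix ([] : List Int)
          (f := fun tr row => tr ++ [PySem.List.pyGetD row col 0])]
    rw [PySem.List.foldl_append_singleton_eq_map]
    simp
  simp only [hinner]
  rw [PySem.List.pyRange_zero_nat, List.map_map]
  simp [Function.comp]

-- ===== VERDICT (by name: the statement is the Claim_ definition above) =====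
theorem transpose_and_flatten_spec : Claim_equal_transpose_and_flatten := by
  intro matrix _ _
  exact transpose_and_flatten_eq matrix
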